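-- pv_equiv track=rewrite | github.com/WestbrookYuan/CSE569S-Lab1 | decoding_flashlight.py | brightness_to_lengths
-- ===== SOURCE A (Python) =====
-- def brightness_to_lengths(threshold, brightness_per_frame):
--     groups = []
--     symbols = []
--
--     tempTrue = []
--     tempFalse = []
--     for i in brightness_per_frame:
--         if i >= threshold:
--             tempTrue.append(i)
--             if tempFalse:
--                 groups.append(tempFalse)
--                 tempFalse = []
--         else:
--             tempFalse.append(i)
--             if tempTrue:
--                 groups.append(tempTrue)
--                 tempTrue = []
--     if brightness_per_frame[-1] < threshold:
--         groups.append(tempFalse)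
--     else:
--         groups.append(tempTrue)
--     for i in groups:
--         if i[0] >= threshold:
--             symbols.append(len(i))
--         else:
--             symbols.append(len(i) * -1)
--     return symbols
-- ===== SOURCE B (Python) =====
-- def brightness_to_lengths(threshold, brightness_per_frame):
--     # One pass, no temp buffers or group lists: keep signed run lengths directly,
--     # extending the last run when the new frame is on the same side of threshold.
--     out = []
--     for x in brightness_per_frame:
--         s = 1 if x >= threshold else -1
--         if out and (out[-1] > 0) == (s > 0):
--             out[-1] += s
--         else:
--             out.append(s)
--     return out
-- ===== Notes on version B (the rewrite author's own statement) =====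
-- stated objective: simpler
-- what changed: B does a single pass that maintains the signed run lengths directly (extend last entry or start a new one), instead of A's two temp buffers, a list of group lists and a second pass converting groups to signed lengths.
import Mathlib
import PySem

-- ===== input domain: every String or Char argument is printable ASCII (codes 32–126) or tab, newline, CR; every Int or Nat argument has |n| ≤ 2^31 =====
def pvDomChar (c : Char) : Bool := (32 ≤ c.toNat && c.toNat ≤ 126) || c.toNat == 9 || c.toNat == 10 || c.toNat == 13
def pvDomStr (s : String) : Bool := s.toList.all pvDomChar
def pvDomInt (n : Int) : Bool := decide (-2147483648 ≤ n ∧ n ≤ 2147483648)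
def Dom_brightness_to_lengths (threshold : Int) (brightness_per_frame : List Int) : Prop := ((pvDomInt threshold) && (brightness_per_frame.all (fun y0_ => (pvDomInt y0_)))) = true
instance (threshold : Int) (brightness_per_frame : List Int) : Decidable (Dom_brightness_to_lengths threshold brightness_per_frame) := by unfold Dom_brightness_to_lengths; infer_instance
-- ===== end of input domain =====

-- B replaces A's temp buffers + group lists + second pass by a single pass that keeps
-- the signed run lengths directly (objective: simpler); equality is claimed on nonempty
-- input (on [] A raises IndexError, excluded by Pre_).

-- ===== PORT A =====
-- loop state: (groups, tempTrue, tempFalse)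
def pvAStep (threshold : Int) (st : List (List Int) × List Int × List Int) (i : Int) :
    List (List Int) × List Int × List Int :=
  match st with
  | (groups, tempTrue, tempFalse) =>
    if i ≥ threshold then
      let tempTrue := tempTrue ++ [i]
      if tempFalse ≠ [] then (groups ++ [tempFalse], tempTrue, [])
      else (groups, tempTrue, tempFalse)
    else
      let tempFalse := tempFalse ++ [i]
      if tempTrue ≠ [] then (groups ++ [tempTrue], [], tempFalse)
      else (groups, tempTrue, tempFalse)

-- second loop: symbols.append(len(i)) / symbols.append(len(i) * -1), keyed by i[0]
def pvSymStep (threshold : Int) (symbols : List Int) (g : List Int) : List Int :=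
  match g with
  | [] => symbols            -- i[0] would raise IndexError; unreachable when the input is nonempty
  | x :: _ => if x ≥ threshold then symbols ++ [(g.length : Int)]
              else symbols ++ [(g.length : Int) * (-1)]

def brightness_to_lengths (threshold : Int) (brightness_per_frame : List Int) : List Int :=
  match brightness_per_frame.foldl (pvAStep threshold) ([], [], []) with
  | (groups, tempTrue, tempFalse) =>
    match PySem.List.pyGet? brightness_per_frame (-1) with
    | none => []             -- brightness_per_frame[-1] raises IndexError here; excluded by Pre_
    | some last =>
      let groups := if last < threshold then groups ++ [tempFalse] else groups ++ [tempTrue]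
      groups.foldl (pvSymStep threshold) []

-- ===== PORT B =====
-- out[-1] += s
def pvAddLast (out : List Int) (s : Int) : List Int :=
  match out with
  | [] => []
  | [x] => [x + s]
  | x :: y :: rest => x :: pvAddLast (y :: rest) s

def pvBStep (threshold : Int) (out : List Int) (x : Int) : List Int :=
  let s : Int := if x ≥ threshold then 1 else -1
  if out ≠ [] ∧ ((0 < out.getLast?.getD 0) ↔ (0 < s)) then pvAddLast out s
  else out ++ [s]

def brightness_to_lengths_alt (threshold : Int) (brightness_per_frame : List Int) : List Int :=
  brightness_per_frame.foldl (pvBStep threshold) []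

-- ===== PRECONDITION & SPEC =====
-- Pre_ excludes exactly the empty list, on which A raises IndexError at brightness_per_frame[-1].
def Pre_brightness_to_lengths (threshold : Int) (brightness_per_frame : List Int) : Prop :=
  brightness_per_frame ≠ []
instance (threshold : Int) (brightness_per_frame : List Int) : Decidable (Pre_brightness_to_lengths threshold brightness_per_frame) := by unfold Pre_brightness_to_lengths; infer_instance

def pvWitness_brightness_to_lengths : Int × List Int := (3, [1, 4, 5, 2, 7])

def Spec_brightness_to_lengths (threshold : Int) (brightness_per_frame : List Int) (out : List Int) : Prop := out = brightness_to_lengths_alt threshold brightness_per_frame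
instance (threshold : Int) (brightness_per_frame : List Int) (out : List Int) : Decidable (Spec_brightness_to_lengths threshold brightness_per_frame out) := by unfold Spec_brightness_to_lengths; infer_instance

-- ===== CLAIM (what is proved, stated in full; the proofs are below) =====
def Claim_equal_brightness_to_lengths : Prop := ∀ (threshold : Int) (brightness_per_frame : List Int), Dom_brightness_to_lengths threshold brightness_per_frame → Pre_brightness_to_lengths threshold brightness_per_frame → Spec_brightness_to_lengths threshold brightness_per_frame (brightness_to_lengths threshold brightness_per_frame)

-- ===== LEMMAS AND PROOFS =====

lemma pvAddLast_append (l : List Int) (a s : Int) :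
    pvAddLast (l ++ [a]) s = l ++ [a + s] := by
  induction l with
  | nil => rfl
  | cons x xs ih =>
    cases xs with
    | nil => simp [pvAddLast]
    | cons y ys => simpa [pvAddLast] using ih

lemma pyGet_last (xs : List Int) (h : xs ≠ []) :
    PySem.List.pyGet? xs (-1) = some (xs.getLast h) := by
  rw [PySem.List.pyGet?_neg_one, List.getLast?_eq_some_getLast]

-- Main invariant lemma: after processing a nonempty prefix, A's state (groups, tT, tF)
-- and B's state out are linked; folding the rest preserves the link and the finished
-- outputs agree.  `side` records whether the last processed element was ≥ threshold.
lemma pv_main (t : Int) (rest : List Int) :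
    ∀ (groups : List (List Int)) (tT tF out : List Int) (side : Bool),
    (side = true → tF = [] ∧ tT ≠ [] ∧ ∀ y ∈ tT, t ≤ y) →
    (side = false → tT = [] ∧ tF ≠ [] ∧ ∀ y ∈ tF, y < t) →
    out = groups.foldl (pvSymStep t) [] ++ [if side then (tT.length : Int) else -(tF.length : Int)] →
    rest.foldl (pvBStep t) out =
      (match rest.foldl (pvAStep t) (groups, tT, tF) with
       | (g', tT', tF') =>
         let side' := if h : rest = [] then side else decide (t ≤ rest.getLast h)
         (if side' then g' ++ [tT'] else g' ++ [tF']).foldl (pvSymStep t) []) := by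
  induction rest with
  | nil =>
    intro groups tT tF out side hT hF hout
    simp only [List.foldl_nil]
    cases side with
    | true =>
      obtain ⟨he, hne, hall⟩ := hT rfl
      obtain ⟨z, zs, rfl⟩ := List.exists_cons_of_ne_nil hne
      have hz0 : t ≤ z := hall z (by simp)
      simp [hout, List.foldl_append, pvSymStep, hz0]
    | false =>
      obtain ⟨he, hne, hall⟩ := hF rfl
      obtain ⟨z, zs, rfl⟩ := List.exists_cons_of_ne_nil hne
      have hz0 : ¬ t ≤ z := not_le.2 (hall z (by simp))
      simp [hout, List.foldl_append, pvSymStep, hz0]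
  | cons x rest ih =>
    intro groups tT tF out side hT hF hout
    have houtne : out ≠ [] := by rw [hout]; simp
    simp only [List.foldl_cons]
    by_cases hx : t ≤ x
    · -- new element on the True side
      cases side with
      | true =>
        obtain ⟨he, hne, hall⟩ := hT rfl
        subst he
        have hpos : (0:Int) < tT.length := by exact_mod_cast List.length_pos_iff.2 hne
        have hlast : out.getLast?.getD 0 = (tT.length : Int) := by rw [hout]; simp
        have hA : pvAStep t (groups, tT, []) x = (groups, tT ++ [x], []) := by
          simp [pvAStep, hx]
        have hB : pvBStep t out x = pvAddLast out 1 := by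
          simp only [pvBStep, hlast]
          rw [if_pos hx]
          split_ifs with h
          · rfl
          · exact absurd ⟨houtne, by omega⟩ h
        have hout' : pvAddLast out 1 = groups.foldl (pvSymStep t) []
            ++ [((tT ++ [x]).length : Int)] := by
          rw [hout]; simp [pvAddLast_append]
        have hall' : ∀ y ∈ tT ++ [x], t ≤ y := by
          intro y hy; rcases List.mem_append.1 hy with h | h
          · exact hall y h
          · simp at h; omega
        rw [hA, hB, ih groups (tT ++ [x]) [] _ true
          (fun _ => ⟨rfl, by simp, hall'⟩) (by simp) hout']
        by_cases hr : rest = []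
        · subst hr; simp [hx]
        · simp only [dif_neg hr, dif_neg (List.cons_ne_nil x rest), List.getLast_cons hr]
      | false =>
        obtain ⟨he, hne, hall⟩ := hF rfl
        subst he
        obtain ⟨z, zs, rfl⟩ := List.exists_cons_of_ne_nil hne
        have hz0 : ¬ t ≤ z := not_le.2 (hall z (by simp))
        have hlast : out.getLast?.getD 0 = -(((z :: zs).length : Int)) := by rw [hout]; simp
        have hA : pvAStep t (groups, [], z :: zs) x = (groups ++ [z :: zs], [x], []) := by
          simp [pvAStep, hx]
        have hB : pvBStep t out x = out ++ [1] := by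
          simp only [pvBStep, hlast]
          rw [if_pos hx]
          split_ifs with h
          · exact absurd (h.2.mpr (by norm_num)) (by omega)
          · rfl
        have hout' : out ++ [1] = (groups ++ [z :: zs]).foldl (pvSymStep t) []
            ++ [((([x] : List Int)).length : Int)] := by
          rw [hout, List.foldl_append]
          simp [pvSymStep, hz0]
        rw [hA, hB, ih (groups ++ [z :: zs]) [x] [] _ true
          (fun _ => ⟨rfl, by simp, by intro y hy; simp at hy; omega⟩) (by simp) hout']
        by_cases hr : rest = []
        · subst hr; simp [hx]
        · simp only [dif_neg hr, dif_neg (List.cons_ne_nil x rest), List.getLast_cons hr]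
    · -- new element on the False side
      have hx' : x < t := not_le.1 hx
      cases side with
      | false =>
        obtain ⟨he, hne, hall⟩ := hF rfl
        subst he
        have hpos : (0:Int) < tF.length := by exact_mod_cast List.length_pos_iff.2 hne
        have hlast : out.getLast?.getD 0 = -((tF.length : Int)) := by rw [hout]; simp
        have hA : pvAStep t (groups, [], tF) x = (groups, [], tF ++ [x]) := by
          simp [pvAStep, hx]
        have hB : pvBStep t out x = pvAddLast out (-1) := by
          simp only [pvBStep, hlast]
          rw [if_neg hx]
          split_ifs with h
          · rfl
          · exact absurd ⟨houtne, by omega⟩ h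
        have hout' : pvAddLast out (-1) = groups.foldl (pvSymStep t) []
            ++ [-(((tF ++ [x]).length : Int))] := by
          rw [hout]; simp [pvAddLast_append]; omega
        have hall' : ∀ y ∈ tF ++ [x], y < t := by
          intro y hy; rcases List.mem_append.1 hy with h | h
          · exact hall y h
          · simp at h; omega
        rw [hA, hB, ih groups [] (tF ++ [x]) _ false
          (by simp) (fun _ => ⟨rfl, by simp, hall'⟩) hout']
        by_cases hr : rest = []
        · subst hr; simp [hx]
        · simp only [dif_neg hr, dif_neg (List.cons_ne_nil x rest), List.getLast_cons hr]
      | true =>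
        obtain ⟨he, hne, hall⟩ := hT rfl
        subst he
        obtain ⟨z, zs, rfl⟩ := List.exists_cons_of_ne_nil hne
        have hz0 : t ≤ z := hall z (by simp)
        have hpos : (0:Int) < ((z :: zs).length : Int) := by
          simp only [List.length_cons]; push_cast; omega
        have hlast : out.getLast?.getD 0 = (((z :: zs).length : Int)) := by rw [hout]; simp
        have hA : pvAStep t (groups, z :: zs, []) x = (groups ++ [z :: zs], [], [x]) := by
          simp [pvAStep, hx]
        have hB : pvBStep t out x = out ++ [-1] := by
          simp only [pvBStep, hlast]
          rw [if_neg hx]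
          split_ifs with h
          · exact absurd (h.2.mp hpos) (by omega)
          · rfl
        have hout' : out ++ [-1] = (groups ++ [z :: zs]).foldl (pvSymStep t) []
            ++ [-((([x] : List Int)).length : Int)] := by
          rw [hout, List.foldl_append]
          simp [pvSymStep, hz0]
        rw [hA, hB, ih (groups ++ [z :: zs]) [] [x] _ false
          (by simp) (fun _ => ⟨rfl, by simp, by intro y hy; simp at hy; omega⟩) hout']
        by_cases hr : rest = []
        · subst hr; simp [hx]
        · simp only [dif_neg hr, dif_neg (List.cons_ne_nil x rest), List.getLast_cons hr]

-- ===== VERDICT (by name: the statement is the Claim_ definition above) =====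
theorem brightness_to_lengths_spec : Claim_equal_brightness_to_lengths := by
  intro t l _ hpre
  unfold Spec_brightness_to_lengths brightness_to_lengths brightness_to_lengths_alt
  obtain ⟨x, xs, rfl⟩ := List.exists_cons_of_ne_nil hpre
  rw [pyGet_last (x :: xs) (by simp)]
  simp only [List.foldl_cons]
  by_cases hx : t ≤ x
  · have hA1 : pvAStep t ([], [], []) x = ([], [x], []) := by simp [pvAStep, hx]
    have hB1 : pvBStep t [] x = [1] := by simp [pvBStep, hx]
    rw [hA1, hB1, pv_main t xs [] [x] [] [1] true
      (fun _ => ⟨rfl, by simp, by simpa using hx⟩) (by simp) (by simp)]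
    by_cases hxs : xs = []
    · subst hxs
      simp [List.getLast, not_lt.2 hx]
    · rcases h : xs.foldl (pvAStep t) ([], [x], []) with ⟨g', tT', tF'⟩
      simp only [dif_neg hxs, List.getLast_cons hxs]
      by_cases hl : t ≤ xs.getLast hxs
      · simp [hl, not_lt.2 hl]
      · simp [hl, not_le.1 hl]
  · have hx' : x < t := not_le.1 hx
    have hA1 : pvAStep t ([], [], []) x = ([], [], [x]) := by simp [pvAStep, hx]
    have hB1 : pvBStep t [] x = [-1] := by simp [pvBStep, hx]
    rw [hA1, hB1, pv_main t xs [] [] [x] [-1] false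
      (by simp) (fun _ => ⟨rfl, by simp, by simpa using hx'⟩) (by simp)]
    by_cases hxs : xs = []
    · subst hxs
      simp [List.getLast, hx']
    · rcases h : xs.foldl (pvAStep t) ([], [], [x]) with ⟨g', tT', tF'⟩
      simp only [dif_neg hxs, List.getLast_cons hxs]
      by_cases hl : t ≤ xs.getLast hxs
      · simp [hl, not_lt.2 hl]
      · simp [hl, not_le.1 hl]
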